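-- pv_equiv track=rewrite | github.com/psi4/psi4 | out/lib/qcengine/programs/tests/standard_suite_contracts.py | contractual_ccsd
-- ===== SOURCE A (Python) =====
-- from typing import Any, Tuple
--
-- def contractual_ccsd(
--     qc_module: str, driver: str, reference: str, method: str, corl_type: str, fcae: str
-- ) -> Tuple[str, str, bool]:
--     """Of the list of QCVariables an ideal CCSD should produce, returns whether or
--     not each is expected, given the calculation circumstances (like QC program).
--
--     {_contractual_docstring}
--     """
--     contractual_qcvars = [
--         "HF TOTAL ENERGY",
--         "CCSD CORRELATION ENERGY",
--         "CCSD TOTAL ENERGY",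
--         "CCSD SAME-SPIN CORRELATION ENERGY",
--         "CCSD SINGLES ENERGY",
--         "CCSD DOUBLES ENERGY",
--         "CCSD OPPOSITE-SPIN CORRELATION ENERGY",
--     ]
--     if driver == "gradient" and method == "ccsd":
--         contractual_qcvars.append("CCSD TOTAL GRADIENT")
--     elif driver == "hessian" and method == "ccsd":
--         # contractual_qcvars.append("CCSD TOTAL GRADIENT")
--         contractual_qcvars.append("CCSD TOTAL HESSIAN")
--
--     for pv in contractual_qcvars:
--         expected = True
--         if (
--             (
--                 (
--                     (qc_module == "gamess" and reference == "rhf" and method in ["ccsd", "ccsd+t(ccsd)", "ccsd(t)"])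
--                     or (
--                         qc_module == "nwchem-tce"
--                         and reference in ["rhf", "uhf"]
--                         and method in ["ccsd", "ccsd+t(ccsd)", "ccsd(t)"]
--                     )
--                     or (
--                         qc_module in ["cfour-ncc", "cfour-ecc"]
--                         and reference in ["rhf"]
--                         and method in ["ccsd", "ccsd+t(ccsd)", "ccsd(t)", "a-ccsd(t)"]
--                     )
--                     or (
--                         qc_module == "psi4-occ"
--                         and reference == "rhf"
--                         and corl_type in ["df", "cd"]
--                         and method in ["ccsd", "ccsd(t)"]
--                     )
--                     or (qc_module in ["cfour-vcc"] and reference in ["rhf", "uhf"] and method in ["ccsd+t(ccsd)"])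
--                 )
--                 and pv in ["CCSD SAME-SPIN CORRELATION ENERGY", "CCSD OPPOSITE-SPIN CORRELATION ENERGY"]
--             )
--             or (
--                 (qc_module == "cfour-vcc" and reference in ["rohf"] and method in ["ccsd", "ccsd(t)"])
--                 and pv
--                 in [
--                     "CCSD SAME-SPIN CORRELATION ENERGY",
--                     "CCSD SINGLES ENERGY",
--                     "CCSD DOUBLES ENERGY",
--                 ]
--             )
--             or (
--                 (qc_module == "cfour-ecc" and reference in ["rohf"] and method in ["ccsd", "ccsd(t)"])
--                 and pv
--                 in [
--                     "CCSD OPPOSITE-SPIN CORRELATION ENERGY",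
--                     "CCSD SINGLES ENERGY",
--                     "CCSD DOUBLES ENERGY",
--                 ]
--             )
--             or (
--                 (
--                     (qc_module == "gamess" and reference in ["rohf"] and method == "ccsd")
--                     or (qc_module == "nwchem-tce" and reference in ["rohf"] and method in ["ccsd", "ccsd(t)"])
--                 )
--                 and pv
--                 in [
--                     "CCSD SAME-SPIN CORRELATION ENERGY",
--                     "CCSD OPPOSITE-SPIN CORRELATION ENERGY",
--                     "CCSD SINGLES ENERGY",
--                     "CCSD DOUBLES ENERGY",
--                 ]
--             )
--             or (
--                 (False)
--                 and pv
--                 in [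
--                     "CCSD CORRELATION ENERGY",
--                     "CCSD TOTAL ENERGY",
--                     "CCSD SAME-SPIN CORRELATION ENERGY",
--                     "CCSD OPPOSITE-SPIN CORRELATION ENERGY",
--                     "CCSD SINGLES ENERGY",
--                     "CCSD DOUBLES ENERGY",
--                 ]
--             )
--         ):
--             expected = False
--
--         yield (pv, pv, expected)
-- ===== SOURCE B (Python) =====
-- def contractual_ccsd(qc_module, driver, reference, method, corl_type, fcae):
--     # Per-variable decomposition: compute each variable's expected flag directly
--     # by boolean algebra over the four (non-trivial) group predicates, then yield
--     # the fixed-order tuples outright -- no list of names, no per-item scanning.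
--     g1 = (
--         (qc_module == "gamess" and reference == "rhf" and method in ["ccsd", "ccsd+t(ccsd)", "ccsd(t)"])
--         or (qc_module == "nwchem-tce" and reference in ["rhf", "uhf"] and method in ["ccsd", "ccsd+t(ccsd)", "ccsd(t)"])
--         or (qc_module in ["cfour-ncc", "cfour-ecc"] and reference in ["rhf"] and method in ["ccsd", "ccsd+t(ccsd)", "ccsd(t)", "a-ccsd(t)"])
--         or (qc_module == "psi4-occ" and reference == "rhf" and corl_type in ["df", "cd"] and method in ["ccsd", "ccsd(t)"])
--         or (qc_module in ["cfour-vcc"] and reference in ["rhf", "uhf"] and method in ["ccsd+t(ccsd)"])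
--     )
--     g2 = qc_module == "cfour-vcc" and reference in ["rohf"] and method in ["ccsd", "ccsd(t)"]
--     g3 = qc_module == "cfour-ecc" and reference in ["rohf"] and method in ["ccsd", "ccsd(t)"]
--     g4 = (
--         (qc_module == "gamess" and reference in ["rohf"] and method == "ccsd")
--         or (qc_module == "nwchem-tce" and reference in ["rohf"] and method in ["ccsd", "ccsd(t)"])
--     )
--     same_spin = not (g1 or g2 or g4)
--     opp_spin = not (g1 or g3 or g4)
--     sing_doub = not (g2 or g3 or g4)
--
--     yield ("HF TOTAL ENERGY", "HF TOTAL ENERGY", True)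
--     yield ("CCSD CORRELATION ENERGY", "CCSD CORRELATION ENERGY", True)
--     yield ("CCSD TOTAL ENERGY", "CCSD TOTAL ENERGY", True)
--     yield ("CCSD SAME-SPIN CORRELATION ENERGY", "CCSD SAME-SPIN CORRELATION ENERGY", same_spin)
--     yield ("CCSD SINGLES ENERGY", "CCSD SINGLES ENERGY", sing_doub)
--     yield ("CCSD DOUBLES ENERGY", "CCSD DOUBLES ENERGY", sing_doub)
--     yield ("CCSD OPPOSITE-SPIN CORRELATION ENERGY", "CCSD OPPOSITE-SPIN CORRELATION ENERGY", opp_spin)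
--     if method == "ccsd":
--         if driver == "gradient":
--             yield ("CCSD TOTAL GRADIENT", "CCSD TOTAL GRADIENT", True)
--         elif driver == "hessian":
--             yield ("CCSD TOTAL HESSIAN", "CCSD TOTAL HESSIAN", True)
-- ===== Notes on version B (the rewrite author's own statement) =====
-- stated objective: simpler
-- what changed: B drops A's loop over a qcvar-name list with per-item re-evaluation of the nested condition block: it evaluates the four group predicates once, derives each variable's expected flag by boolean algebra (same-spin, opposite-spin, singles/doubles), and emits the fixed-order tuples directly, with the conditional gradient/hessian tuple appended at the end.
import Mathlib
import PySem

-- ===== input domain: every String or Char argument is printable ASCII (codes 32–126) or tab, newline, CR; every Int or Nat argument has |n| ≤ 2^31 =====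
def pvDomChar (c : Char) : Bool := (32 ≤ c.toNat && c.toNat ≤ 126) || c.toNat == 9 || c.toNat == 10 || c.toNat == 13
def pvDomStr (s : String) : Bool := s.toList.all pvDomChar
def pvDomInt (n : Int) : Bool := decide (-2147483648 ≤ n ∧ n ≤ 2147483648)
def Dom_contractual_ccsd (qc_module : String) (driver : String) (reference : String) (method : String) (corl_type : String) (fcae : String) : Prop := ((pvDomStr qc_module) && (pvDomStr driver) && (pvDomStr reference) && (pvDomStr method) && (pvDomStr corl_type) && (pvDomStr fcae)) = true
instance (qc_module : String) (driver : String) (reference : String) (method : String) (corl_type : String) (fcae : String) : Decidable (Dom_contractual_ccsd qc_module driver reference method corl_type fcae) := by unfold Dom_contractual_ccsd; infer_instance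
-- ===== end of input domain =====

-- B replaces A's loop-and-rescan with a per-variable decomposition: each variable's flag is computed
-- directly by boolean algebra over the four group predicates and the tuples are emitted outright
-- (objective: simpler; same cost at this scale).
-- ===== PORT A =====
-- literal transliteration of A: build the qcvar list, then per item re-evaluate the whole condition block
def contractual_ccsd (qc_module : String) (driver : String) (reference : String) (method : String) (corl_type : String) (fcae : String) : List (String × String × Bool) :=
  let contractual_qcvars : List String :=
    ["HF TOTAL ENERGY",
     "CCSD CORRELATION ENERGY",
     "CCSD TOTAL ENERGY",
     "CCSD SAME-SPIN CORRELATION ENERGY",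
     "CCSD SINGLES ENERGY",
     "CCSD DOUBLES ENERGY",
     "CCSD OPPOSITE-SPIN CORRELATION ENERGY"]
  let contractual_qcvars : List String :=
    if driver == "gradient" && method == "ccsd" then
      contractual_qcvars ++ ["CCSD TOTAL GRADIENT"]
    else if driver == "hessian" && method == "ccsd" then
      contractual_qcvars ++ ["CCSD TOTAL HESSIAN"]
    else contractual_qcvars
  contractual_qcvars.map (fun pv =>
    let expected := true
    let expected :=
      if ((((qc_module == "gamess" && reference == "rhf" && ["ccsd", "ccsd+t(ccsd)", "ccsd(t)"].contains method)
            || (qc_module == "nwchem-tce" && ["rhf", "uhf"].contains reference && ["ccsd", "ccsd+t(ccsd)", "ccsd(t)"].contains method)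
            || (["cfour-ncc", "cfour-ecc"].contains qc_module && ["rhf"].contains reference && ["ccsd", "ccsd+t(ccsd)", "ccsd(t)", "a-ccsd(t)"].contains method)
            || (qc_module == "psi4-occ" && reference == "rhf" && ["df", "cd"].contains corl_type && ["ccsd", "ccsd(t)"].contains method)
            || (["cfour-vcc"].contains qc_module && ["rhf", "uhf"].contains reference && ["ccsd+t(ccsd)"].contains method))
           && ["CCSD SAME-SPIN CORRELATION ENERGY", "CCSD OPPOSITE-SPIN CORRELATION ENERGY"].contains pv)
          || ((qc_module == "cfour-vcc" && ["rohf"].contains reference && ["ccsd", "ccsd(t)"].contains method)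
              && ["CCSD SAME-SPIN CORRELATION ENERGY", "CCSD SINGLES ENERGY", "CCSD DOUBLES ENERGY"].contains pv)
          || ((qc_module == "cfour-ecc" && ["rohf"].contains reference && ["ccsd", "ccsd(t)"].contains method)
              && ["CCSD OPPOSITE-SPIN CORRELATION ENERGY", "CCSD SINGLES ENERGY", "CCSD DOUBLES ENERGY"].contains pv)
          || (((qc_module == "gamess" && ["rohf"].contains reference && method == "ccsd")
               || (qc_module == "nwchem-tce" && ["rohf"].contains reference && ["ccsd", "ccsd(t)"].contains method))
              && ["CCSD SAME-SPIN CORRELATION ENERGY", "CCSD OPPOSITE-SPIN CORRELATION ENERGY", "CCSD SINGLES ENERGY", "CCSD DOUBLES ENERGY"].contains pv)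
          || (false
              && ["CCSD CORRELATION ENERGY", "CCSD TOTAL ENERGY", "CCSD SAME-SPIN CORRELATION ENERGY", "CCSD OPPOSITE-SPIN CORRELATION ENERGY", "CCSD SINGLES ENERGY", "CCSD DOUBLES ENERGY"].contains pv))
      then false else expected
    (pv, pv, expected))

-- ===== PORT B =====
-- B: per-variable flags computed once by boolean algebra over the four group predicates; tuples emitted directly
def contractual_ccsd_alt (qc_module : String) (driver : String) (reference : String) (method : String) (corl_type : String) (fcae : String) : List (String × String × Bool) :=
  let g1 : Bool :=
    (qc_module == "gamess" && reference == "rhf" && ["ccsd", "ccsd+t(ccsd)", "ccsd(t)"].contains method)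
    || (qc_module == "nwchem-tce" && ["rhf", "uhf"].contains reference && ["ccsd", "ccsd+t(ccsd)", "ccsd(t)"].contains method)
    || (["cfour-ncc", "cfour-ecc"].contains qc_module && ["rhf"].contains reference && ["ccsd", "ccsd+t(ccsd)", "ccsd(t)", "a-ccsd(t)"].contains method)
    || (qc_module == "psi4-occ" && reference == "rhf" && ["df", "cd"].contains corl_type && ["ccsd", "ccsd(t)"].contains method)
    || (["cfour-vcc"].contains qc_module && ["rhf", "uhf"].contains reference && ["ccsd+t(ccsd)"].contains method)
  let g2 : Bool := qc_module == "cfour-vcc" && ["rohf"].contains reference && ["ccsd", "ccsd(t)"].contains method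
  let g3 : Bool := qc_module == "cfour-ecc" && ["rohf"].contains reference && ["ccsd", "ccsd(t)"].contains method
  let g4 : Bool :=
    (qc_module == "gamess" && ["rohf"].contains reference && method == "ccsd")
    || (qc_module == "nwchem-tce" && ["rohf"].contains reference && ["ccsd", "ccsd(t)"].contains method)
  let same_spin : Bool := !(g1 || g2 || g4)
  let opp_spin : Bool := !(g1 || g3 || g4)
  let sing_doub : Bool := !(g2 || g3 || g4)
  [("HF TOTAL ENERGY", "HF TOTAL ENERGY", true),
   ("CCSD CORRELATION ENERGY", "CCSD CORRELATION ENERGY", true),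
   ("CCSD TOTAL ENERGY", "CCSD TOTAL ENERGY", true),
   ("CCSD SAME-SPIN CORRELATION ENERGY", "CCSD SAME-SPIN CORRELATION ENERGY", same_spin),
   ("CCSD SINGLES ENERGY", "CCSD SINGLES ENERGY", sing_doub),
   ("CCSD DOUBLES ENERGY", "CCSD DOUBLES ENERGY", sing_doub),
   ("CCSD OPPOSITE-SPIN CORRELATION ENERGY", "CCSD OPPOSITE-SPIN CORRELATION ENERGY", opp_spin)]
  ++ (if method == "ccsd" then
        if driver == "gradient" then [("CCSD TOTAL GRADIENT", "CCSD TOTAL GRADIENT", true)]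
        else if driver == "hessian" then [("CCSD TOTAL HESSIAN", "CCSD TOTAL HESSIAN", true)]
        else []
      else [])

-- ===== PRECONDITION & SPEC =====
def Spec_contractual_ccsd (qc_module : String) (driver : String) (reference : String) (method : String) (corl_type : String) (fcae : String) (out : List (String × String × Bool)) : Prop := out = contractual_ccsd_alt qc_module driver reference method corl_type fcae
instance (qc_module : String) (driver : String) (reference : String) (method : String) (corl_type : String) (fcae : String) (out : List (String × String × Bool)) : Decidable (Spec_contractual_ccsd qc_module driver reference method corl_type fcae out) := by unfold Spec_contractual_ccsd; infer_instance

-- ===== CLAIM (what is proved, stated in full; the proofs are below) =====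
def Claim_equal_contractual_ccsd : Prop := ∀ (qc_module : String) (driver : String) (reference : String) (method : String) (corl_type : String) (fcae : String), Dom_contractual_ccsd qc_module driver reference method corl_type fcae → Spec_contractual_ccsd qc_module driver reference method corl_type fcae (contractual_ccsd qc_module driver reference method corl_type fcae)

-- ===== LEMMAS AND PROOFS =====

-- ===== VERDICT (by name: the statement is the Claim_ definition above) =====
theorem contractual_ccsd_spec : Claim_equal_contractual_ccsd := by
  intro qc_module driver reference method corl_type fcae _
  unfold Spec_contractual_ccsd contractual_ccsd contractual_ccsd_alt
  cases hm : method == "ccsd" <;>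
    cases hg : driver == "gradient" <;>
      cases hh : driver == "hessian" <;>
        simp [hm, hg, hh, List.map, Bool.beq_eq_decide_eq, Bool.or_assoc, Bool.and_assoc]
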